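-- pv_equiv track=rewrite | github.com/pilkyuchoi/programmers | level2/124 나라의 숫자.py | solution
-- ===== SOURCE A (Python) =====
-- from itertools import product
--
-- onetwofour = [1, 2, 4]
--
-- def solution(n):
--     length = 0
--     i = 1
--
--     while length < n:
--         idx = length
--         length += 3**i
--         i += 1
--
--     answer = ''
--     for j in list(product(onetwofour, repeat=(i-1)))[n-idx-1]:
--         answer += str(j)
--
--     return answer
-- ===== SOURCE B (Python) =====
-- def solution(n):
--     digits = []
--     while n > 0:
--         n, r = divmod(n - 1, 3)
--         digits.append("124"[r])
--     return ''.join(reversed(digits))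
-- ===== Notes on version B (the rewrite author's own statement) =====
-- stated objective: faster
-- what changed: A finds the digit count by summing powers of 3 and then materialises the full cartesian product of {1,2,4}^k to index one tuple (O(n) time and memory); B extracts the digits directly with repeated divmod((n-1),3), O(log n) time and memory.
import Mathlib
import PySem

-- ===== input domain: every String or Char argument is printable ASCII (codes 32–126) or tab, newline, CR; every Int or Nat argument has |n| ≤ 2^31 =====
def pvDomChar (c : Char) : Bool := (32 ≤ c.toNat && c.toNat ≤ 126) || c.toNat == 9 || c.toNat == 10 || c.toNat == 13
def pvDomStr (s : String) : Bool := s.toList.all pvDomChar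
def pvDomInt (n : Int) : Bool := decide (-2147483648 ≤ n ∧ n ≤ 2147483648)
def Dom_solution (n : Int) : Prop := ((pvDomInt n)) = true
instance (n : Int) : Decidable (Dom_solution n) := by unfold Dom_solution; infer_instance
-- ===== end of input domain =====

-- B replaces A's O(n) sum-powers + full cartesian-product-and-index scheme by direct
-- O(log n) bijective base-3 digit extraction (objective: faster, asymptotic in a timing run).


-- ===== PORT A =====
-- 'while length < n: idx = length; length += 3**i; i += 1' (i stays a Nat exponent: it
-- starts at 1 and is only incremented, so it is always a nonnegative Python int)
def solAWhile (n length idx : Int) (i : Nat) : Int × Nat :=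
  if length < n then solAWhile n (length + 3 ^ i) length (i + 1) else (idx, i)
termination_by (n - length).toNat
decreasing_by
  have h1 : (1 : Int) ≤ 3 ^ i := one_le_pow₀ (by norm_num)
  omega

-- list(product([1,2,4], repeat=k)) in itertools order (first coordinate varies slowest)
def solAProd : Nat → List (List Int)
  | 0 => [[]]
  | k + 1 => [1, 2, 4].flatMap (fun d => (solAProd k).map (fun t => d :: t))

def solution (n : Int) : String :=
  -- length = 0; i = 1; while …  (idx is unassigned before the loop: Python raises
  -- UnboundLocalError when n ≤ 0; those inputs are excluded by Pre_solution, the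
  -- initial value 0 here is never read under Pre_)
  let r := solAWhile n 0 0 1
  -- for j in list(product(onetwofour, repeat=i-1))[n-idx-1]: answer += str(j)
  match PySem.List.pyGet? (solAProd (r.2 - 1)) (n - r.1 - 1) with
  | some t => t.foldl (fun acc j => acc ++ PySem.Int.toStr j) ""
  | none => ""   -- IndexError: unreachable under Pre_solution

-- ===== PORT B =====
-- while n > 0: n, r = divmod(n-1, 3); digits.append("124"[r])
def solBLoop (n : Int) (digits : List Char) : List Char :=
  if 0 < n then
    let q := PySem.Int.floordiv (n - 1) 3
    let r := PySem.Int.mod (n - 1) 3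
    -- "124"[r]: exact, since r = (n-1) % 3 ∈ {0,1,2} (Python mod with positive divisor)
    solBLoop q (digits ++ [if r = 0 then '1' else if r = 1 then '2' else '4'])
  else digits
termination_by n.toNat
decreasing_by
  have h1 : PySem.Int.floordiv (n - 1) 3 = (n - 1) / 3 :=
    PySem.Int.floordiv_eq_ediv_of_pos (by norm_num)
  have h2 : (n - 1) / 3 ≤ n - 1 := Int.ediv_le_self _ (by omega)
  have h3 : (0 : Int) ≤ (n - 1) / 3 := Int.ediv_nonneg (by omega) (by norm_num)
  omega

-- return ''.join(reversed(digits))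
def solution_alt (n : Int) : String := String.ofList (solBLoop n []).reverse

-- ===== PRECONDITION & SPEC =====
-- Pre_ excludes n ≤ 0, where A's while-loop body never runs and A raises
-- UnboundLocalError on 'idx' (no value returned).
def Pre_solution (n : Int) : Prop := 1 ≤ n
instance (n : Int) : Decidable (Pre_solution n) := by unfold Pre_solution; infer_instance
def pvWitness_solution : Int := (7)

def Spec_solution (n : Int) (out : String) : Prop := out = solution_alt n
instance (n : Int) (out : String) : Decidable (Spec_solution n out) := by
  unfold Spec_solution; infer_instance

-- ===== CLAIM (what is proved, stated in full; the proofs are below) =====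
def Claim_equal_solution : Prop :=
  ∀ (n : Int), Dom_solution n → Pre_solution n → Spec_solution n (solution n)
-- ===== LEMMAS AND PROOFS =====

-- T k = 3 + 9 + … + 3^k, the number of 124-words of length ≤ k (A's 'length' after k iterations)
def pvT : Nat → Nat
  | 0 => 0
  | k + 1 => pvT k + 3 ^ (k + 1)

-- digit value / digit character for a base-3 digit d ∈ {0,1,2}
def pvVal (d : Nat) : Int := if d = 0 then 1 else if d = 1 then 2 else 4
def pvCh (d : Nat) : Char := if d = 0 then '1' else if d = 1 then '2' else '4'
def pvChInt (d : Int) : Char := if d = 1 then '1' else if d = 2 then '2' else '4'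

-- the j-th element of product([1,2,4], repeat=k), top digit first
def pvF : Nat → Nat → List Int
  | 0, _ => []
  | k + 1, j => pvVal (j / 3 ^ k) :: pvF k (j % 3 ^ k)

-- reference digits of n in the bijective 1/2/4 system, bottom digit last
def pvG (n : Nat) : List Char :=
  if n = 0 then [] else pvG ((n - 1) / 3) ++ [pvCh ((n - 1) % 3)]
termination_by n
decreasing_by
  rename_i h
  have := Nat.div_le_self (n - 1) 3
  omega

theorem pvT_succ_eq (k : Nat) : pvT (k + 1) = 3 * pvT k + 3 := by
  induction k with
  | zero => decide
  | succ k ih =>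
    show pvT (k + 1) + 3 ^ (k + 2) = 3 * (pvT k + 3 ^ (k + 1)) + 3
    rw [ih, pow_succ, pow_succ]
    ring

theorem pvT_mono : Monotone pvT := by
  apply monotone_nat_of_le_succ
  intro k; exact Nat.le_add_right _ _

theorem pvT_closed (k : Nat) : 2 * pvT k + 3 = 3 ^ (k + 1) := by
  induction k with
  | zero => decide
  | succ k ih =>
    show 2 * (pvT k + 3 ^ (k + 1)) + 3 = 3 ^ (k + 2)
    rw [pow_succ 3 (k + 1)]
    omega

-- evaluations of pvG on one-digit inputs
theorem pvG_zero : pvG 0 = [] := by rw [pvG]; norm_num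
theorem pvG_one : pvG 1 = ['1'] := by rw [pvG]; norm_num [pvG_zero, pvCh]
theorem pvG_two : pvG 2 = ['2'] := by rw [pvG]; norm_num [pvG_zero, pvCh]
theorem pvG_three : pvG 3 = ['4'] := by rw [pvG]; norm_num [pvG_zero, pvCh]

-- B's loop = reversed reference digits
theorem solBLoop_eq (m : Nat) : ∀ (n : Int), n.toNat = m → ∀ ds,
    solBLoop n ds = ds ++ (pvG m).reverse := by
  induction m using Nat.strong_induction_on with
  | _ m ih =>
    intro n hm ds
    rw [solBLoop]
    by_cases hn : 0 < n
    · have hm1 : 1 ≤ m := by omega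
      have hnm : n = (m : Int) := by omega
      have hq : PySem.Int.floordiv (n - 1) 3 = (((m - 1) / 3 : Nat) : Int) := by
        rw [show n - 1 = ((m - 1 : Nat) : Int) by omega]
        exact_mod_cast PySem.Int.floordiv_natCast (m - 1) 3
      have hr : PySem.Int.mod (n - 1) 3 = (((m - 1) % 3 : Nat) : Int) := by
        rw [show n - 1 = ((m - 1 : Nat) : Int) by omega]
        exact_mod_cast PySem.Int.mod_natCast (m - 1) 3
      simp only [hn, if_true, hq, hr]
      have hlt : (m - 1) / 3 < m := by omega
      rw [ih _ hlt _ (Int.toNat_natCast _)]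
      have hg : pvG m = pvG ((m - 1) / 3) ++ [pvCh ((m - 1) % 3)] := by
        rw [pvG]; simp [show ¬ m = 0 by omega]
      have hch : (if (((m - 1) % 3 : Nat) : Int) = 0 then '1'
          else if (((m - 1) % 3 : Nat) : Int) = 1 then '2' else '4') = pvCh ((m - 1) % 3) := by
        have h3 : (m - 1) % 3 = 0 ∨ (m - 1) % 3 = 1 ∨ (m - 1) % 3 = 2 := by omega
        rcases h3 with h | h | h <;> simp [h, pvCh]
      rw [hg, hch]
      simp
    · have hm0 : m = 0 := by omega
      simp [hn, hm0, pvG]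

-- A's while loop, from the state after iteration number m, stops at the band index k
theorem solAWhile_band : ∀ (d k m : Nat) (n : Int), k - m = d → 1 ≤ m → m ≤ k →
    (pvT (k - 1) : Int) < n → n ≤ (pvT k : Int) →
    solAWhile n (pvT m) (pvT (m - 1)) (m + 1) = ((pvT (k - 1) : Int), k + 1) := by
  intro d
  induction d with
  | zero =>
    intro k m n hd h1 hmk hlo hhi
    have : m = k := by omega
    subst this
    rw [solAWhile]
    simp only [show ¬ ((pvT m : Int) < n) by omega, if_false]
  | succ d ih =>
    intro k m n hd h1 hmk hlo hhi
    have hmk' : m < k := by omega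
    have hcond : (pvT m : Int) < n := by
      have : pvT m ≤ pvT (k - 1) := pvT_mono (by omega)
      omega
    rw [solAWhile]
    simp only [hcond, if_true]
    have hstep : (pvT m : Int) + 3 ^ (m + 1) = (pvT (m + 1) : Int) := by
      show _ = ((pvT m + 3 ^ (m + 1) : Nat) : Int)
      push_cast
      ring
    rw [hstep, show (pvT m : Int) = (pvT ((m + 1) - 1) : Int) by simp]
    exact ih k (m + 1) n (by omega) (by omega) (by omega) hlo hhi

-- every n ≥ 1 lies in exactly one band (pvT (k-1), pvT k]
theorem band_exists (m : Nat) (h : 1 ≤ m) :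
    ∃ k, 1 ≤ k ∧ pvT (k - 1) < m ∧ m ≤ pvT k := by
  induction m with
  | zero => omega
  | succ m ih =>
    by_cases hm : 1 ≤ m
    · obtain ⟨k, hk1, hlo, hhi⟩ := ih hm
      by_cases hin : m + 1 ≤ pvT k
      · exact ⟨k, hk1, by omega, hin⟩
      · refine ⟨k + 1, by omega, by simpa using (by omega : pvT k < m + 1), ?_⟩
        show m + 1 ≤ pvT k + 3 ^ (k + 1)
        have : 1 ≤ 3 ^ (k + 1) := Nat.one_le_pow _ _ (by norm_num)
        omega
    · have : m = 0 := by omega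
      exact ⟨1, by omega, by simp [this, pvT], by simp [this]; decide⟩

-- the product list: length and indexing
theorem solAProd_length (k : Nat) : (solAProd k).length = 3 ^ k := by
  induction k with
  | zero => decide
  | succ k ih => simp [solAProd, List.flatMap, ih, pow_succ]; ring

theorem solAProd_get (k : Nat) : ∀ j, j < 3 ^ k → (solAProd k)[j]? = some (pvF k j) := by
  induction k with
  | zero => intro j hj; interval_cases j; decide
  | succ k ih =>
    intro j hj
    have hflat : solAProd (k + 1) =
        ((solAProd k).map (fun t => (1 : Int) :: t)) ++
        (((solAProd k).map (fun t => (2 : Int) :: t)) ++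
         ((solAProd k).map (fun t => (4 : Int) :: t))) := by
      simp [solAProd, List.flatMap]
    have hlen : ∀ (d : Int), ((solAProd k).map (fun t => d :: t)).length = 3 ^ k := by
      intro d; simp [solAProd_length]
    have hpos : 0 < 3 ^ k := pow_pos (by norm_num) _
    rw [hflat]
    by_cases h1 : j < 3 ^ k
    · rw [List.getElem?_append_left (by rw [hlen]; exact h1)]
      rw [List.getElem?_map, ih j h1]
      have hd : j / 3 ^ k = 0 := Nat.div_eq_of_lt h1
      have hm : j % 3 ^ k = j := Nat.mod_eq_of_lt h1
      simp [pvF, hd, hm, pvVal]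
    · rw [List.getElem?_append_right (by rw [hlen]; omega)]
      rw [hlen]
      by_cases h2 : j < 2 * 3 ^ k
      · rw [List.getElem?_append_left (by rw [hlen]; omega)]
        rw [List.getElem?_map, ih (j - 3 ^ k) (by omega)]
        have hd : j / 3 ^ k = 1 := Nat.div_eq_of_lt_le (by omega) (by omega)
        have hm : j % 3 ^ k = j - 3 ^ k := by
          rw [Nat.mod_eq_sub_mod (by omega), Nat.mod_eq_of_lt (by omega)]
        simp [pvF, hd, hm, pvVal]
      · rw [List.getElem?_append_right (by rw [hlen]; omega)]
        rw [hlen, List.getElem?_map, ih (j - 3 ^ k - 3 ^ k) (by rw [pow_succ] at hj; omega)]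
        have hd : j / 3 ^ k = 2 := by
          apply Nat.div_eq_of_lt_le (by omega)
          rw [pow_succ] at hj; omega
        have hm : j % 3 ^ k = j - 3 ^ k - 3 ^ k := by
          rw [Nat.mod_eq_sub_mod (by omega), Nat.mod_eq_sub_mod (by omega),
              Nat.mod_eq_of_lt (by rw [pow_succ] at hj; omega)]
        simp [pvF, hd, hm, pvVal]

-- peeling the LAST digit off a k-digit word
theorem pvF_last : ∀ (k j : Nat), 1 ≤ k → j < 3 ^ k →
    pvF k j = pvF (k - 1) (j / 3) ++ [pvVal (j % 3)] := by
  intro k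
  induction k with
  | zero => omega
  | succ k ih =>
    intro j _ hj
    simp only [Nat.add_sub_cancel]
    by_cases hk : 1 ≤ k
    · obtain ⟨k', rfl⟩ : ∃ k', k = k' + 1 := ⟨k - 1, by omega⟩
      simp only [Nat.add_sub_cancel] at ih
      show pvVal (j / 3 ^ (k' + 1)) :: pvF (k' + 1) (j % 3 ^ (k' + 1)) =
        pvVal ((j / 3) / 3 ^ k') :: (pvF k' ((j / 3) % 3 ^ k') ++ [pvVal (j % 3)])
      rw [ih (j % 3 ^ (k' + 1)) (by omega) (Nat.mod_lt _ (pow_pos (by norm_num) _))]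
      have e1 : j % 3 ^ (k' + 1) % 3 = j % 3 := Nat.mod_mod_of_dvd _ (dvd_pow_self 3 (by omega))
      have e2 : j % 3 ^ (k' + 1) / 3 = j / 3 % 3 ^ k' := by
        rw [show (3 : Nat) ^ (k' + 1) = 3 * 3 ^ k' from by rw [← pow_succ']]
        exact Nat.mod_mul_right_div_self j 3 (3 ^ k')
      have e3 : j / 3 / 3 ^ k' = j / 3 ^ (k' + 1) := by
        rw [Nat.div_div_eq_div_mul, ← pow_succ']
      rw [e1, e2, e3]
    · have hk0 : k = 0 := by omega
      subst hk0
      have hj3 : j < 3 := by simpa using hj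
      have hd0 : j / 3 = 0 := Nat.div_eq_of_lt hj3
      show pvVal (j / 3 ^ 0) :: pvF 0 (j % 3 ^ 0) = pvF 0 (j / 3) ++ [pvVal (j % 3)]
      simp [pvF, Nat.mod_eq_of_lt hj3]

theorem chInt_val (d : Nat) (h : d < 3) : pvChInt (pvVal d) = pvCh d := by
  interval_cases d <;> decide

-- the indexed product tuple spells exactly the reference digits of n
theorem pvF_pvG : ∀ (k m : Nat), 1 ≤ k → pvT (k - 1) < m → m ≤ pvT k →
    (pvF k (m - pvT (k - 1) - 1)).map pvChInt = pvG m := by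
  intro k
  induction k with
  | zero => omega
  | succ k ih =>
    intro m _ hlo hhi
    simp only [Nat.add_sub_cancel] at hlo hhi ⊢
    have hm1 : 1 ≤ m := by omega
    set j := m - pvT k - 1 with hjdef
    have hTk1 : pvT (k + 1) = pvT k + 3 ^ (k + 1) := rfl
    have hp : (3 : Nat) ^ (k + 1) = 3 ^ k * 3 := pow_succ 3 k
    have hj : j < 3 ^ (k + 1) := by omega
    have hgm : pvG m = pvG ((m - 1) / 3) ++ [pvCh ((m - 1) % 3)] := by
      rw [pvG]; simp [show ¬ m = 0 by omega]
    by_cases hk : 1 ≤ k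
    · have hTsucc : pvT k = 3 * pvT (k - 1) + 3 := by
        have := pvT_succ_eq (k - 1); rw [show k - 1 + 1 = k by omega] at this; exact this
      have hc : 2 * pvT (k - 1) + 3 = 3 ^ k := by
        have := pvT_closed (k - 1); rw [show k - 1 + 1 = k by omega] at this; exact this
      have hm1' : m - 1 = 3 * (pvT (k - 1) + 1) + j := by omega
      have hmod : (m - 1) % 3 = j % 3 := by omega
      have hdiv : (m - 1) / 3 = pvT (k - 1) + 1 + j / 3 := by omega
      have hj3 : j / 3 < 3 ^ k := by omega
      have hband_lo : pvT (k - 1) < (m - 1) / 3 := by omega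
      have hband_hi : (m - 1) / 3 ≤ pvT k := by omega
      have hidx : (m - 1) / 3 - pvT (k - 1) - 1 = j / 3 := by omega
      rw [hgm, ← ih ((m - 1) / 3) hk hband_lo hband_hi, hidx]
      rw [pvF_last (k + 1) j (by omega) hj]
      simp only [Nat.add_sub_cancel, List.map_append, List.map_cons, List.map_nil]
      rw [chInt_val (j % 3) (by omega), hmod]
    · have hk0 : k = 0 := by omega
      subst hk0
      -- k = 1 : m ∈ {1,2,3}, single digit
      have h0 : pvT 0 = 0 := rfl
      have hm3 : m ≤ 3 := by omega
      have hj' : j = m - 1 := by omega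
      rw [hj']
      interval_cases m
      · rw [pvG_one]; decide
      · rw [pvG_two]; decide
      · rw [pvG_three]; decide

-- entries of pvF are 1, 2 or 4
theorem pvF_mem : ∀ (k j : Nat) (d : Int), d ∈ pvF k j → d = 1 ∨ d = 2 ∨ d = 4 := by
  intro k
  induction k with
  | zero => intro j d hd; exact absurd (hd : d ∈ ([] : List Int)) List.not_mem_nil
  | succ k ih =>
    intro j d hd
    simp only [pvF, List.mem_cons] at hd
    rcases hd with h | h
    · subst h; unfold pvVal; split_ifs <;> tauto
    · exact ih _ _ h

-- the str(j)-appending fold spells the mapped characters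
theorem fold_toStr (l : List Int) (h : ∀ d ∈ l, d = 1 ∨ d = 2 ∨ d = 4) (s : String) :
    l.foldl (fun acc j => acc ++ PySem.Int.toStr j) s = s ++ String.ofList (l.map pvChInt) := by
  induction l generalizing s with
  | nil => simp
  | cons d l ih =>
    have hd := h d (by simp)
    have hstr : PySem.Int.toStr d = String.ofList [pvChInt d] := by
      rcases hd with h | h | h <;> subst h <;> decide
    simp only [List.foldl_cons, List.map_cons]
    rw [ih (fun x hx => h x (by simp [hx])), hstr]
    rw [show pvChInt d :: List.map pvChInt l = [pvChInt d] ++ List.map pvChInt l from rfl,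
        String.ofList_append, ← String.append_assoc]

-- ===== VERDICT =====
theorem solution_spec : Claim_equal_solution := by
  intro n _ hpre
  unfold Spec_solution Pre_solution at *
  have hm1 : 1 ≤ n.toNat := by omega
  obtain ⟨k, hk1, hlo, hhi⟩ := band_exists n.toNat hm1
  -- A's while loop
  have hcast_lo : (pvT (k - 1) : Int) < n := by omega
  have hcast_hi : n ≤ (pvT k : Int) := by omega
  have hloop : solAWhile n 0 0 1 = ((pvT (k - 1) : Int), k + 1) := by
    rw [solAWhile]
    simp only [show (0 : Int) < n by omega, if_true]
    have h0 : (0 : Int) + 3 ^ 1 = (pvT 1 : Int) := by decide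
    rw [h0, show (0 : Int) = (pvT (1 - 1) : Int) by decide]
    exact solAWhile_band (k - 1) k 1 n rfl (by omega) hk1 hcast_lo hcast_hi
  set j : Nat := n.toNat - pvT (k - 1) - 1 with hjdef
  have hjlt : j < 3 ^ k := by
    have hc1 : 2 * pvT (k - 1) + 3 = 3 ^ k := by
      have := pvT_closed (k - 1); rw [show k - 1 + 1 = k by omega] at this; exact this
    have hc2 : 2 * pvT k + 3 = 3 ^ (k + 1) := pvT_closed k
    have hp : (3 : Nat) ^ (k + 1) = 3 ^ k * 3 := pow_succ 3 k
    omega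
  have hidx : (n - (pvT (k - 1) : Int) - 1).toNat = j := by omega
  unfold solution
  rw [hloop]
  simp only [Nat.add_sub_cancel]
  rw [PySem.List.pyGet?_of_nonneg (solAProd k) (by omega), hidx, solAProd_get k j hjlt]
  show List.foldl (fun acc j => acc ++ PySem.Int.toStr j) "" (pvF k j) = solution_alt n
  rw [fold_toStr _ (fun d hd => pvF_mem k j d hd) ""]
  rw [pvF_pvG k n.toNat hk1 hlo hhi]
  -- B's side
  unfold solution_alt
  rw [solBLoop_eq n.toNat n rfl []]
  simp
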